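-- pv_equiv track=rewrite | github.com/itrin9634/Algorithm-Study | 백준/Silver/3085. 사탕 게임/사탕 게임.py | check
-- ===== SOURCE A (Python) =====
-- def check(arr):
--     n = len(arr)
--     answer = 1
--     # 행
--     for i in range(n):
--         cnt = 1
--         for j in range(1, n):
--             if arr[i][j] == arr[i][j-1]:
--                 cnt += 1
--                 answer = max(cnt, answer)
--             else:
--                 cnt = 1
--
--         # 열
--         cnt = 1
--         for j in range(1, n):
--             if arr[j][i] == arr[j-1][i]:
--                 cnt += 1
--                 answer = max(cnt, answer)
--             else:
--                 cnt = 1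
--     return answer
-- ===== SOURCE B (Python) =====
-- def check(arr):
--     n = len(arr)
--     best = 1
--     lines = list(arr) + [[arr[j][i] for j in range(n)] for i in range(n)]
--     for line in lines:
--         line = line[:n]
--         cuts = [0] + [k for k in range(1, n) if line[k] != line[k - 1]] + [n]
--         best = max(best, max(b - a for a, b in zip(cuts, cuts[1:])))
--     return best
-- ===== Notes on version B (the rewrite author's own statement) =====
-- stated objective: alternative
-- what changed: Instead of maintaining a run counter with reset branches, B computes for each row/column the positions where adjacent candies differ (change-points with sentinels 0 and n) and takes the maximum spacing between consecutive change-points, which equals the longest run.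
-- outside the precondition, e.g. on check([[]]): A returns 1, B raises IndexError
import Mathlib
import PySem

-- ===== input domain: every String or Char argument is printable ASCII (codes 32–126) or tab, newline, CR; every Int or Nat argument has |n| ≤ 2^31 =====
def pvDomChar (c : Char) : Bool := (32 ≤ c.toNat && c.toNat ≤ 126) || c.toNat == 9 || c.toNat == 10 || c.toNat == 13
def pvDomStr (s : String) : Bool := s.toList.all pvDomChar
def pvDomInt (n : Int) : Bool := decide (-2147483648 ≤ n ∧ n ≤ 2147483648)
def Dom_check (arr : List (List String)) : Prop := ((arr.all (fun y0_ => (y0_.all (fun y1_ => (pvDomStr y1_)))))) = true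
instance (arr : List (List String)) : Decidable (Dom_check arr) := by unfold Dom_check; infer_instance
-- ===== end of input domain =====

-- B replaces A's run counter with change-point positions: per row/column it lists the indices
-- where adjacent entries differ (with sentinels 0 and n) and takes the largest spacing (alternative decomposition, same cost).

-- ===== PORT A =====
-- arr[i][j]: the .getD defaults mark IndexError, excluded by Pre_check
def aGet (arr : List (List String)) (i j : Int) : String :=
  (PySem.List.pyGet? ((PySem.List.pyGet? arr i).getD []) j).getD ""

def check (arr : List (List String)) : Int :=
  let n : Int := arr.length
  (PySem.List.pyRange 0 n 1).foldl (fun answer i =>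
    let s1 := (PySem.List.pyRange 1 n 1).foldl (fun (s : Int × Int) j =>
      if aGet arr i j == aGet arr i (j - 1) then (s.1 + 1, max (s.1 + 1) s.2)
      else ((1 : Int), s.2)) (1, answer)
    let s2 := (PySem.List.pyRange 1 n 1).foldl (fun (s : Int × Int) j =>
      if aGet arr j i == aGet arr (j - 1) i then (s.1 + 1, max (s.1 + 1) s.2)
      else ((1 : Int), s.2)) (1, s1.2)
    s2.2) 1

-- ===== PORT B =====
-- arr[j][i] in the column comprehension; the .getD defaults mark IndexError, excluded by Pre_check
def bGet (arr : List (List String)) (i j : Int) : String :=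
  (PySem.List.pyGet? ((PySem.List.pyGet? arr j).getD []) i).getD ""

-- line[k]; the .getD "" marks IndexError, excluded by Pre_check
def lineGet (l : List String) (k : Int) : String :=
  (PySem.List.pyGet? l k).getD ""

-- the loop body over one line: line = line[:n]; cuts = [0] + change-points + [n];
-- max(b - a for a, b in zip(cuts, cuts[1:])) — the .getD 0 marks ValueError on an empty
-- generator, unreachable since cuts always holds both sentinels
def lineBest (n : Int) (line0 : List String) : Int :=
  let line := PySem.List.slice line0 none (some n)
  let cuts := [(0 : Int)] ++ ((PySem.List.pyRange 1 n 1).filter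
      (fun k => !(lineGet line k == lineGet line (k - 1)))) ++ [n]
  ((cuts.zip (cuts.drop 1)).map (fun p => p.2 - p.1)).max?.getD 0

def check_alt (arr : List (List String)) : Int :=
  -- lines = rows + columns ([arr[j][i] for j in range(n)]), n = len(arr)
  (arr ++ (PySem.List.pyRange 0 (arr.length : Int) 1).map (fun i =>
      (PySem.List.pyRange 0 (arr.length : Int) 1).map (fun j => bGet arr i j))).foldl
    (fun best line0 => max best (lineBest (arr.length : Int) line0)) 1

-- ===== PRECONDITION & SPEC =====
-- Pre_check: every row has at least n = len(arr) entries, the inputs on which neither program's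
-- column indexing raises IndexError. It additionally excludes the one-row board whose row is empty,
-- where A's loops never run so A returns 1 while B's column access raises IndexError.
def Pre_check (arr : List (List String)) : Prop := ∀ row ∈ arr, arr.length ≤ row.length
instance (arr : List (List String)) : Decidable (Pre_check arr) := by unfold Pre_check; infer_instance

def pvWitness_check : List (List String) := [["a", "a"], ["b", "a"]]

def Spec_check (arr : List (List String)) (out : Int) : Prop := out = check_alt arr
instance (arr : List (List String)) (out : Int) : Decidable (Spec_check arr out) := by unfold Spec_check; infer_instance

-- ===== CLAIM (what is proved, stated in full; the proofs are below) =====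
def Claim_equal_check : Prop := ∀ (arr : List (List String)), Dom_check arr → Pre_check arr → Spec_check arr (check arr)

-- ===== LEMMAS AND PROOFS =====

-- run lengths of the maximal groups of equal consecutive elements (proof-side common yardstick)
def goGroup (prev : String) (cnt : Int) : List String → List Int
  | [] => [cnt]
  | y :: ys => if y == prev then goGroup y (cnt + 1) ys else cnt :: goGroup y 1 ys

def groupRuns : List String → List Int
  | [] => []
  | x :: xs => goGroup x 1 xs

-- largest run length of a line (0 for [])
def runmax (l : List String) : Int := (groupRuns l).foldl max 0

-- A's counter loop over one line, in structural form
def passFold (prev : String) (cnt ans : Int) : List String → Int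
  | [] => ans
  | y :: ys => if y == prev then passFold y (cnt + 1) (max (cnt + 1) ans) ys
               else passFold y 1 ans ys

-- B's change-point list over one line, in structural form
def cutsRec (k : Int) (prev : String) : List String → List Int
  | [] => []
  | y :: ys => if y == prev then cutsRec (k + 1) y ys else k :: cutsRec (k + 1) y ys

-- successive differences (= the zip/map in check_alt)
def gapsOf : List Int → List Int
  | a :: b :: t => (b - a) :: gapsOf (b :: t)
  | _ => []

theorem foldl_maxf_max {α : Type} (f : α → Int) :
    ∀ (l : List α) (x y : Int),
      l.foldl (fun a i => max a (f i)) (max x y) = max x (l.foldl (fun a i => max a (f i)) y) := by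
  intro l
  induction l with
  | nil => intro x y; rfl
  | cons i t ih =>
    intro x y
    simp only [List.foldl_cons]
    rw [max_assoc, ih]

theorem goGroup_le : ∀ (ys : List String) (prev : String) (c b : Int),
    c ≤ (goGroup prev c ys).foldl max b := by
  intro ys
  induction ys with
  | nil =>
    intro prev c b
    simp [goGroup]
  | cons y ys ih =>
    intro prev c b
    simp only [goGroup]
    by_cases h : y == prev
    · simp only [h, if_true]
      have := ih y (c+1) b
      omega
    · simp only [h, Bool.false_eq_true, if_false, List.foldl_cons]
      have h1 : c ≤ max b c := le_max_right b c
      have h2 := (PySem.List.le_foldl_max (goGroup y 1 ys) (max b c)).1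
      omega

theorem goGroup_mem : ∀ (ys : List String) (prev : String) (c : Int), 1 ≤ c →
    ∀ g ∈ goGroup prev c ys, 1 ≤ g := by
  intro ys
  induction ys with
  | nil =>
    intro prev c hc g hg
    simp [goGroup] at hg
    omega
  | cons y ys ih =>
    intro prev c hc g hg
    simp only [goGroup] at hg
    by_cases h : y == prev
    · simp only [h, if_true] at hg
      exact ih y (c + 1) (by omega) g hg
    · simp only [h, Bool.false_eq_true, if_false, List.mem_cons] at hg
      rcases hg with rfl | hg
      · exact hc
      · exact ih y 1 le_rfl g hg

theorem passFold_eq : ∀ (ys : List String) (prev : String) (cnt ans : Int),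
    1 ≤ cnt → cnt ≤ ans →
    passFold prev cnt ans ys = max ans ((goGroup prev cnt ys).foldl max 0) := by
  intro ys
  induction ys with
  | nil =>
    intro prev cnt ans h1 h2
    simp only [passFold, goGroup, List.foldl_cons, List.foldl_nil]
    omega
  | cons y ys ih =>
    intro prev cnt ans h1 h2
    simp only [passFold, goGroup]
    by_cases h : y == prev
    · simp only [h, if_true]
      rw [ih y (cnt+1) (max (cnt+1) ans) (by omega) (le_max_left _ _)]
      have := goGroup_le ys y (cnt+1) 0
      omega
    · simp only [h, Bool.false_eq_true, if_false, List.foldl_cons]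
      rw [ih y 1 ans le_rfl (by omega)]
      have heq : (goGroup y 1 ys).foldl max (max 0 cnt) = max cnt ((goGroup y 1 ys).foldl max 0) := by
        rw [max_comm 0 cnt, foldl_maxf_max (fun x : Int => x)]
      rw [heq]
      omega

theorem foldA_eq_passFold (get : Int → String) :
    ∀ (rest : List String) (k : Int) (prev : String) (cnt ans : Int),
      get (k - 1) = prev →
      (∀ m : Nat, m < rest.length → get (k + m) = rest.getD m "") →
      ((PySem.List.pyRange k (k + rest.length) 1).foldl
        (fun (s : Int × Int) j => if get j == get (j - 1) then (s.1 + 1, max (s.1 + 1) s.2)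
                                  else ((1 : Int), s.2)) (cnt, ans)).2
        = passFold prev cnt ans rest := by
  intro rest
  induction rest with
  | nil =>
    intro k prev cnt ans h0 h1
    rw [PySem.List.pyRange_one_eq_nil (by simp)]
    rfl
  | cons y ys ih =>
    intro k prev cnt ans h0 h1
    have hb : k + (((y :: ys).length : Nat) : Int) = (k + 1) + (ys.length : Int) := by
      push_cast [List.length_cons]; ring
    rw [hb, PySem.List.pyRange_one_cons (by omega)]
    simp only [List.foldl_cons]
    have hy : get k = y := by
      have := h1 0 (by simp)
      simpa using this
    rw [hy, h0]
    have h0' : get ((k + 1) - 1) = y := by simpa using hy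
    have h1' : ∀ m : Nat, m < ys.length → get ((k + 1) + m) = ys.getD m "" := by
      intro m hm
      have := h1 (m + 1) (by simpa using Nat.succ_lt_succ hm)
      have harg : k + ((m + 1 : Nat) : Int) = (k + 1) + (m : Int) := by push_cast; ring
      rw [harg] at this
      simpa using this
    simp only [passFold]
    by_cases h : y == prev
    · simp only [h, if_true]
      exact ih (k + 1) y (cnt + 1) (max (cnt + 1) ans) h0' h1'
    · simp only [h, Bool.false_eq_true, if_false]
      exact ih (k + 1) y 1 ans h0' h1'

theorem inner_eq (get : Int → String) (l : List String) (hl : l ≠ []) (n : Int)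
    (hn : n = l.length)
    (hget : ∀ j : Int, 0 ≤ j → j < n → get j = l.getD j.toNat "")
    (ans : Int) (hans : 1 ≤ ans) :
    ((PySem.List.pyRange 1 n 1).foldl
      (fun (s : Int × Int) j => if get j == get (j - 1) then (s.1 + 1, max (s.1 + 1) s.2)
                                else ((1 : Int), s.2)) (1, ans)).2
      = max ans (runmax l) := by
  match l, hl with
  | x :: xs, _ =>
    have hn' : n = 1 + (xs.length : Int) := by simp at hn; omega
    have h0 : get (1 - 1) = x := by
      have := hget 0 le_rfl (by omega)
      simpa using this
    have h1 : ∀ m : Nat, m < xs.length → get (1 + m) = xs.getD m "" := by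
      intro m hm
      have hlt : (1 : Int) + m < n := by omega
      have := hget (1 + m) (by omega) hlt
      have ht : ((1 : Int) + m).toNat = m + 1 := by omega
      rw [ht] at this
      simpa using this
    rw [hn', foldA_eq_passFold get xs 1 x 1 ans h0 h1,
        passFold_eq xs x 1 ans le_rfl hans]
    rfl

-- ===== B-side: the change-point list is the run-length list in disguise =====

theorem zip_drop_map : ∀ (l : List Int),
    ((l.zip (l.drop 1)).map (fun p => p.2 - p.1)) = gapsOf l := by
  intro l
  induction l with
  | nil => rfl
  | cons a t ih =>
    cases t with
    | nil => rfl
    | cons b t' =>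
      simp only [List.drop_succ_cons, List.drop_zero, List.zip_cons_cons, List.map_cons]
      have : t'.drop 0 = (b :: t').drop 1 := rfl
      rw [show gapsOf (a :: b :: t') = (b - a) :: gapsOf (b :: t') from rfl]
      rw [← ih]
      rfl

theorem filter_eq_cutsRec (get : Int → String) :
    ∀ (rest : List String) (k : Int) (prev : String),
      get (k - 1) = prev →
      (∀ m : Nat, m < rest.length → get (k + m) = rest.getD m "") →
      (PySem.List.pyRange k (k + rest.length) 1).filter (fun j => !(get j == get (j - 1)))
        = cutsRec k prev rest := by
  intro rest
  induction rest with
  | nil =>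
    intro k prev h0 h1
    rw [PySem.List.pyRange_one_eq_nil (by simp)]
    rfl
  | cons y ys ih =>
    intro k prev h0 h1
    have hb : k + (((y :: ys).length : Nat) : Int) = (k + 1) + (ys.length : Int) := by
      push_cast [List.length_cons]; ring
    rw [hb, PySem.List.pyRange_one_cons (by omega)]
    have hy : get k = y := by
      have := h1 0 (by simp)
      simpa using this
    have h0' : get ((k + 1) - 1) = y := by simpa using hy
    have h1' : ∀ m : Nat, m < ys.length → get ((k + 1) + m) = ys.getD m "" := by
      intro m hm
      have := h1 (m + 1) (by simpa using Nat.succ_lt_succ hm)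
      have harg : k + ((m + 1 : Nat) : Int) = (k + 1) + (m : Int) := by push_cast; ring
      rw [harg] at this
      simpa using this
    rw [List.filter_cons]
    simp only [hy, h0, cutsRec]
    by_cases h : y == prev
    · simp only [h, Bool.not_true, if_true, if_false, Bool.false_eq_true]
      exact ih (k + 1) y h0' h1'
    · simp only [h, Bool.not_false, Bool.false_eq_true, if_false, reduceIte]
      rw [ih (k + 1) y h0' h1']

theorem gapsOf_cutsRec : ∀ (ys : List String) (prev : String) (k s : Int),
    gapsOf (s :: (cutsRec k prev ys ++ [k + (ys.length : Int)])) = goGroup prev (k - s) ys := by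
  intro ys
  induction ys with
  | nil =>
    intro prev k s
    simp only [cutsRec, List.nil_append, List.length_nil, Nat.cast_zero, add_zero]
    rfl
  | cons y ys ih =>
    intro prev k s
    have hlen : k + (((y :: ys).length : Nat) : Int) = (k + 1) + (ys.length : Int) := by
      push_cast [List.length_cons]; ring
    rw [hlen]
    simp only [cutsRec, goGroup]
    by_cases h : y == prev
    · simp only [h, if_true]
      rw [ih y (k + 1) s]
      congr 1
      ring
    · simp only [h, Bool.false_eq_true, if_false, List.cons_append]
      rw [show gapsOf (s :: k :: (cutsRec (k + 1) y ys ++ [k + 1 + (ys.length : Int)]))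
          = (k - s) :: gapsOf (k :: (cutsRec (k + 1) y ys ++ [k + 1 + (ys.length : Int)])) from rfl]
      rw [ih y (k + 1) k]
      congr 2
      ring

theorem max?_getD_eq_foldl (gs : List Int) (h : ∀ g ∈ gs, 0 ≤ g) :
    gs.max?.getD 0 = gs.foldl max 0 := by
  cases gs with
  | nil => rfl
  | cons a t =>
    have ha : (0 : Int) ≤ a := h a (by simp)
    simp only [List.max?_cons', Option.getD_some, List.foldl_cons]
    rw [max_eq_right ha]

-- the whole per-line computation of check_alt equals runmax
theorem cuts_gaps (l : List String) (hl : l ≠ []) (n : Int) (hn : n = (l.length : Int)) :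
    ((([(0 : Int)] ++ ((PySem.List.pyRange 1 n 1).filter
          (fun k => !(lineGet l k == lineGet l (k - 1)))) ++ [n]).zip
        (([(0 : Int)] ++ ((PySem.List.pyRange 1 n 1).filter
          (fun k => !(lineGet l k == lineGet l (k - 1)))) ++ [n]).drop 1)).map
        (fun p => p.2 - p.1)).max?.getD 0 = runmax l := by
  match l, hl with
  | x :: xs, _ =>
    have h0 : lineGet (x :: xs) ((1 : Int) - 1) = x := by
      norm_num [lineGet, PySem.List.pyGet?, PySem.List.pyIdx?]
    have h1 : ∀ m : Nat, m < xs.length → lineGet (x :: xs) (1 + m) = xs.getD m "" := by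
      intro m hm
      have hc : (1 : Int) + (m : Int) = ((m + 1 : Nat) : Int) := by push_cast; ring
      rw [hc]
      simp only [lineGet, PySem.List.pyGet?_natCast]
      rw [List.getElem?_cons_succ, List.getD_eq_getElem?_getD]
    have hn' : n = 1 + (xs.length : Int) := by simp at hn; omega
    rw [hn', filter_eq_cutsRec (lineGet (x :: xs)) xs 1 x h0 h1]
    rw [zip_drop_map]
    have hform : [(0 : Int)] ++ cutsRec 1 x xs ++ [1 + (xs.length : Int)]
        = (0 : Int) :: (cutsRec 1 x xs ++ [1 + (xs.length : Int)]) := by simp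
    rw [hform, gapsOf_cutsRec xs x 1 0]
    have hmem : ∀ g ∈ goGroup x (1 - 0) xs, 0 ≤ g := by
      intro g hg
      have := goGroup_mem xs x (1 - 0) (by norm_num) g hg
      omega
    rw [max?_getD_eq_foldl _ hmem]
    norm_num [runmax, groupRuns]

-- the whole loop body equals the longest run of the truncated line
theorem lineBest_eq (n : Int) (line0 : List String) (hn0 : 1 ≤ n)
    (hlen : n ≤ (line0.length : Int)) :
    lineBest n line0 = runmax (line0.take n.toNat) := by
  have hcast : n = ((n.toNat : Nat) : Int) := by omega
  have hsl : PySem.List.slice line0 none (some n) = line0.take n.toNat := by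
    rw [hcast, PySem.List.slice_to_natCast]
    simp
    omega
  have hlt : (line0.take n.toNat).length = n.toNat := by
    simp
    omega
  have hne : line0.take n.toNat ≠ [] := by
    intro h
    rw [h] at hlt
    simp at hlt
    omega
  simp only [lineBest, hsl]
  exact cuts_gaps (line0.take n.toNat) hne n (by rw [hlt]; omega)

def rowline (arr : List (List String)) (i : Nat) : List String :=
  (arr.getD i []).take arr.length

def colline (arr : List (List String)) (i : Nat) : List String :=
  arr.map (fun row => row.getD i "")

theorem getD_map_lt {α β : Type} (f : α → β) (l : List α) (i : Nat) (d : β) (d' : α)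
    (h : i < l.length) : (l.map f).getD i d = f (l.getD i d') := by
  rw [List.getD_eq_getElem _ _ (by simpa using h), List.getD_eq_getElem _ _ h, List.getElem_map]

theorem fold_to_range (f : List String → Int) :
    ∀ (ls : List (List String)) (s : Int),
      ls.foldl (fun a l => max a (f l)) s
        = (List.range ls.length).foldl (fun a i => max a (f (ls.getD i []))) s := by
  intro ls
  induction ls with
  | nil => intro s; rfl
  | cons x t ih =>
    intro s
    simp only [List.foldl_cons, List.length_cons, List.range_succ_eq_map, List.foldl_map,
      List.getD_cons_succ, List.getD_cons_zero]
    exact ih _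

theorem interleave_split (f g : Nat → Int) :
    ∀ (l : List Nat) (s : Int),
      l.foldl (fun a i => max a (max (f i) (g i))) s
        = l.foldl (fun a i => max a (g i)) (l.foldl (fun a i => max a (f i)) s) := by
  intro l
  induction l with
  | nil => intro s; rfl
  | cons i t ih =>
    intro s
    simp only [List.foldl_cons]
    rw [ih, show max s (max (f i) (g i)) = max (g i) (max s (f i)) by
      rw [max_comm (f i) (g i), max_left_comm], foldl_maxf_max f t (g i) (max s (f i)),
      max_comm (g i) _]

theorem rowline_length (arr : List (List String)) (hpre : Pre_check arr) (i : Nat)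
    (hi : i < arr.length) : (rowline arr i).length = arr.length := by
  have hmem : arr.getD i [] ∈ arr := by
    rw [List.getD_eq_getElem arr [] hi]; exact List.getElem_mem hi
  have := hpre _ hmem
  simp only [rowline, List.length_take]
  omega

theorem aGet_row (arr : List (List String)) (hpre : Pre_check arr) (i : Nat)
    (hi : i < arr.length) (j : Int) (hj0 : 0 ≤ j) (hjn : j < (arr.length : Int)) :
    aGet arr (i : Int) j = (rowline arr i).getD j.toNat "" := by
  have hrowe : arr.getD i [] = arr[i] := List.getD_eq_getElem arr [] hi
  have hmem : arr[i] ∈ arr := List.getElem_mem hi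
  have hlen : arr.length ≤ arr[i].length := hpre _ hmem
  have hjrow : j.toNat < (rowline arr i).length := by
    rw [rowline_length arr hpre i hi]; omega
  unfold aGet
  rw [PySem.List.pyGet?_natCast, List.getElem?_eq_getElem hi, Option.getD_some,
      PySem.List.pyGet?_of_nonneg _ hj0,
      List.getElem?_eq_getElem (show j.toNat < arr[i].length by omega), Option.getD_some,
      List.getD_eq_getElem _ _ hjrow]
  simp only [rowline, List.getElem_take, hrowe]

theorem colline_length (arr : List (List String)) (i : Nat) :
    (colline arr i).length = arr.length := by
  simp [colline]

theorem aGet_col (arr : List (List String)) (hpre : Pre_check arr) (i : Nat)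
    (hi : i < arr.length) (j : Int) (hj0 : 0 ≤ j) (hjn : j < (arr.length : Int)) :
    aGet arr j (i : Int) = (colline arr i).getD j.toNat "" := by
  have hjt : j.toNat < arr.length := by omega
  have he : arr.getD j.toNat [] = arr[j.toNat] := List.getD_eq_getElem arr [] hjt
  have hmem : arr[j.toNat] ∈ arr := List.getElem_mem hjt
  have hlen : arr.length ≤ arr[j.toNat].length := hpre _ hmem
  unfold aGet
  rw [PySem.List.pyGet?_of_nonneg _ hj0, List.getElem?_eq_getElem hjt, Option.getD_some,
      PySem.List.pyGet?_natCast,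
      List.getElem?_eq_getElem (show i < arr[j.toNat].length by omega), Option.getD_some]
  unfold colline
  rw [getD_map_lt _ _ _ _ [] hjt,
      List.getD_eq_getElem _ _ (show i < (arr.getD j.toNat []).length by rw [he]; omega)]
  exact (List.getElem_of_eq he.symm (by omega))

theorem outerA (arr : List (List String)) (hpre : Pre_check arr) :
    ∀ (l : List Nat), (∀ i ∈ l, i < arr.length) → ∀ ans : Int, 1 ≤ ans →
      List.foldl (fun (answer : Int) (i : Nat) =>
        (List.foldl (fun (s : Int × Int) j =>
            if aGet arr j (i : Int) == aGet arr (j - 1) (i : Int) then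
              (s.1 + 1, max (s.1 + 1) s.2) else ((1 : Int), s.2))
          (1, (List.foldl (fun (s : Int × Int) j =>
              if aGet arr (i : Int) j == aGet arr (i : Int) (j - 1) then
                (s.1 + 1, max (s.1 + 1) s.2) else ((1 : Int), s.2))
            (1, answer) (PySem.List.pyRange 1 (arr.length : Int))).2)
          (PySem.List.pyRange 1 (arr.length : Int))).2) ans l
      = List.foldl (fun a i => max a (max (runmax (rowline arr i)) (runmax (colline arr i)))) ans l := by
  intro l
  induction l with
  | nil => intro _ ans _; rfl
  | cons i t ih =>
    intro hl ans hans
    have hi : i < arr.length := hl i (by simp)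
    have hn1 : 1 ≤ arr.length := by omega
    have hrne : rowline arr i ≠ [] := by
      have := rowline_length arr hpre i hi
      intro h; rw [h] at this; simp at this; omega
    have hcne : colline arr i ≠ [] := by
      have := colline_length arr i
      intro h; rw [h] at this; simp at this; omega
    have hr : (List.foldl (fun (s : Int × Int) j =>
          if aGet arr (i : Int) j == aGet arr (i : Int) (j - 1) then
            (s.1 + 1, max (s.1 + 1) s.2) else ((1 : Int), s.2))
          (1, ans) (PySem.List.pyRange 1 (arr.length : Int))).2
        = max ans (runmax (rowline arr i)) :=
      inner_eq (fun j => aGet arr (i : Int) j) (rowline arr i) hrne (arr.length : Int)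
        (by rw [rowline_length arr hpre i hi])
        (fun j hj0 hjn => aGet_row arr hpre i hi j hj0 hjn) ans hans
    have hans2 : 1 ≤ max ans (runmax (rowline arr i)) := le_trans hans (le_max_left _ _)
    have hc : (List.foldl (fun (s : Int × Int) j =>
          if aGet arr j (i : Int) == aGet arr (j - 1) (i : Int) then
            (s.1 + 1, max (s.1 + 1) s.2) else ((1 : Int), s.2))
          (1, max ans (runmax (rowline arr i))) (PySem.List.pyRange 1 (arr.length : Int))).2
        = max (max ans (runmax (rowline arr i))) (runmax (colline arr i)) :=
      inner_eq (fun j => aGet arr j (i : Int)) (colline arr i) hcne (arr.length : Int)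
        (by rw [colline_length arr i])
        (fun j hj0 hjn => aGet_col arr hpre i hi j hj0 hjn) _ hans2
    simp only [List.foldl_cons]
    rw [hr, hc, max_assoc]
    refine ih (fun x hx => hl x (by simp [hx])) _ (le_trans hans2 ?_)
    rw [← max_assoc]
    exact le_max_left _ _

-- the column comprehension of check_alt builds colline
theorem col_eq (arr : List (List String)) (hpre : Pre_check arr) (i : Nat)
    (hi : i < arr.length) :
    (PySem.List.pyRange 0 (arr.length : Int) 1).map (fun j => bGet arr (i : Int) j)
      = colline arr i := by
  rw [PySem.List.pyRange_zero_nat, List.map_map]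
  apply List.ext_getElem
  · simp [colline]
  · intro j hj hj'
    have hjlen : j < arr.length := by simpa using hj
    have hmem : arr[j] ∈ arr := List.getElem_mem hjlen
    have hlen : arr.length ≤ arr[j].length := hpre _ hmem
    simp only [List.getElem_map, List.getElem_range, Function.comp_apply, colline]
    unfold bGet
    simp only [PySem.List.pyGet?_natCast]
    rw [List.getElem?_eq_getElem hjlen, Option.getD_some,
        List.getElem?_eq_getElem (show i < arr[j].length by omega), Option.getD_some,
        List.getD_eq_getElem _ _ (show i < arr[j].length by omega)]

-- ===== VERDICT (by name: the statement is the Claim_ definition above) =====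
theorem check_spec : Claim_equal_check := by
  intro arr _ hpre
  unfold Spec_check
  have hA : check arr = (List.range arr.length).foldl
      (fun a i => max a (max (runmax (rowline arr i)) (runmax (colline arr i)))) 1 := by
    simp only [check]
    rw [PySem.List.pyRange_zero_nat, List.foldl_map]
    exact outerA arr hpre (List.range arr.length) (by simp) 1 le_rfl
  by_cases harr : arr = []
  · subst harr
    rw [hA]
    rfl
  · have hn1 : 1 ≤ arr.length := by
      cases arr with
      | nil => exact absurd rfl harr
      | cons a t => simp
    have hB : check_alt arr = (List.range arr.length).foldl
        (fun a i => max a (runmax (colline arr i)))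
        ((List.range arr.length).foldl (fun a i => max a (runmax (rowline arr i))) 1) := by
      unfold check_alt
      rw [List.foldl_append]
      have hrows : arr.foldl (fun best line0 => max best (lineBest (arr.length : Int) line0)) 1
          = (List.range arr.length).foldl (fun a i => max a (runmax (rowline arr i))) 1 := by
        rw [PySem.List.foldl_congr_mem' arr _ (fun a l => max a (runmax (l.take arr.length))) 1
          (fun row hrow acc => by
            have hle : arr.length ≤ row.length := hpre row hrow
            rw [lineBest_eq (arr.length : Int) row (by omega) (by omega)]
            simp)]
        rw [fold_to_range (fun l => runmax (l.take arr.length)) arr 1]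
        rfl
      rw [hrows]
      rw [PySem.List.pyRange_zero_nat, List.foldl_map, List.foldl_map]
      apply PySem.List.foldl_congr_mem' (List.range arr.length)
      intro i hi acc
      have hilt : i < arr.length := by simpa using hi
      rw [← PySem.List.pyRange_zero_nat, col_eq arr hpre i hilt,
          lineBest_eq (arr.length : Int) (colline arr i) (by omega)
            (by rw [colline_length arr i])]
      have : (colline arr i).take ((arr.length : Int)).toNat = colline arr i := by
        rw [Int.toNat_natCast, ← colline_length arr i, List.take_length]
      rw [this]
    rw [hA, hB,
      interleave_split (fun i => runmax (rowline arr i)) (fun i => runmax (colline arr i))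
        (List.range arr.length) 1]
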